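-- pv_equiv track=rewrite | github.com/smileostrich/algorithm-practice | problemSolving/others/del9/p2.py | solution
-- ===== SOURCE A (Python) =====
-- from collections import Counter
--
-- def solution(research, n, k):
--     s_research = list(set(list(''.join(research))))
--     s_research.sort()
--     dic_word = {i:[0]*len(research) for i in s_research}
--     for idx, word in enumerate(research):
--         for key,v in Counter(word).most_common():
--             dic_word[key][idx] = v
--     h_cnt = 0
--     result = ''
--     for word in s_research:
--         cur_cnt = 0
--         con = 0
--         word_sum = 0
--         for idx, cur in enumerate(dic_word[word]):
--             if cur >= k:
--                 word_sum += cur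
--                 con += 1
--                 if con == n:
--                     if 2*n*k <= word_sum:
--                         cur_cnt += 1
--                     word_sum -= dic_word[word][idx-n+1]
--                     con = n-1
--             else:
--                 con = 0
--                 word_sum = 0
--         if cur_cnt > h_cnt:
--             h_cnt = cur_cnt
--             result = word
--     if h_cnt==0:
--         return "None"
--     else:
--         return result
-- ===== SOURCE B (Python) =====
-- def solution(research, n, k):
--     chars = sorted(set(''.join(research)))
--     best = "None"
--     best_cnt = 0
--     for c in chars:
--         counts = [sum(1 for ch in w if ch == c) for w in research]
--         cnt = 0
--         if n >= 1:
--             for i in range(len(counts) - n + 1):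
--                 win = counts[i:i+n]
--                 if all(x >= k for x in win) and sum(win) >= 2*n*k:
--                     cnt += 1
--         if cnt > best_cnt:
--             best_cnt = cnt
--             best = c
--     return best
-- ===== Notes on version B (the rewrite author's own statement) =====
-- stated objective: alternative
-- what changed: Replaces A's per-index sliding-window state machine (running streak counter and incrementally updated window sum over a precomputed char->count-array dict) by a direct per-character scan: build the count list per character on the fly and test every length-n window independently (all counts >= k and window sum >= 2nk).
import Mathlib
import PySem

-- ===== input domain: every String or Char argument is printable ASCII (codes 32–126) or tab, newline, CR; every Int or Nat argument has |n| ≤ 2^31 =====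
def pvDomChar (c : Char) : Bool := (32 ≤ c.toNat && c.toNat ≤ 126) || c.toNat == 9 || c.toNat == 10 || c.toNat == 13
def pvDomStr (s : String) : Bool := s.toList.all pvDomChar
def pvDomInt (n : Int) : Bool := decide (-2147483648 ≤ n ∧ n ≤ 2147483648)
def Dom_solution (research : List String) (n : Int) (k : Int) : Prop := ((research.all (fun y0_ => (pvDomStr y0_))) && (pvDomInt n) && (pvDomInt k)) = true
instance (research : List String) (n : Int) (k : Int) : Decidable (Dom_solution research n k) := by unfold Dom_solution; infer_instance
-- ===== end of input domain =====

-- B is an alternative decomposition: instead of A's sliding-window state machine over a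
-- precomputed dict of per-char count arrays, it tests each length-n window independently.

-- ===== PORT A =====
-- A's inner sliding loop over one per-char count list cs (state = (cur_cnt, con, word_sum));
-- the pyGetD index idx-n+1 is in range whenever that branch runs (con = n there).
def innerA (cs : List Int) (n k : Int) : Int × Int × Int :=
  (PySem.List.enumerate cs).foldl (fun t p =>
    if k ≤ p.2 then
      let ws := t.2.2 + p.2
      let con := t.2.1 + 1
      if con = n then
        ((if 2*n*k ≤ ws then t.1 + 1 else t.1), n - 1, ws - PySem.List.pyGetD cs (p.1 - n + 1) 0)
      else (t.1, con, ws)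
    else (t.1, 0, 0)) (0, 0, 0)

def solution (research : List String) (n : Int) (k : Int) : String :=
  -- s_research = sorted(set(list(''.join(research))))
  let s_research := PySem.List.sorted (PySem.Set.ofList (PySem.Str.join "" research).toList) (fun x => x) false
  -- dic_word = {i:[0]*len(research) for i in s_research}
  let d0 : PySem.Dict Char (List Int) :=
    s_research.foldl (fun d c => d.insert c (List.replicate research.length 0)) PySem.Dict.empty
  -- for idx, word in enumerate(research): for key, v in Counter(word).most_common(): dic_word[key][idx] = v
  -- (most_common() = items sorted by count, descending, stable)
  let d1 := (PySem.List.enumerate research).foldl (fun d p =>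
      (PySem.List.sorted (PySem.Dict.counter p.2.toList).items (fun q => q.2) true).foldl
        (fun d q => d.modify q.1 [] (fun l => PySem.List.pySetD l p.1 q.2)) d) d0
  -- main loop: h_cnt / result accumulator, then the final h_cnt == 0 test
  let final := s_research.foldl (fun st c =>
      let inner := innerA (d1.getD c []) n k
      if st.1 < inner.1 then (inner.1, String.ofList [c]) else st) ((0 : Int), "")
  if final.1 = 0 then "None" else final.2

-- ===== PORT B =====
-- B's per-char window count: for i in range(len(cs)-n+1), count windows cs[i:i+n]
-- with all entries >= k and sum >= 2nk (0 when n < 1).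
def winCount (cs : List Int) (n k : Int) : Int :=
  if 1 ≤ n then
    (PySem.List.pyRange 0 ((cs.length : Int) - n + 1) 1).foldl (fun acc i =>
      let win := PySem.List.slice cs (some i) (some (i + n))
      if win.all (fun x => decide (k ≤ x)) && decide (2*n*k ≤ win.sum) then acc + 1 else acc) 0
  else 0

def solution_alt (research : List String) (n : Int) (k : Int) : String :=
  let chars := PySem.List.sorted (PySem.Set.ofList (PySem.Str.join "" research).toList) (fun x => x) false
  let final := chars.foldl (fun (st : String × Int) c =>
      let counts : List Int :=
        research.map (fun w => w.toList.foldl (fun acc ch => if ch == c then acc + 1 else acc) 0)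
      let cnt := winCount counts n k
      if st.2 < cnt then (String.ofList [c], cnt) else st) ("None", 0)
  final.1

-- ===== PRECONDITION & SPEC =====
def Spec_solution (research : List String) (n : Int) (k : Int) (out : String) : Prop := out = solution_alt research n k
instance (research : List String) (n : Int) (k : Int) (out : String) : Decidable (Spec_solution research n k out) := by unfold Spec_solution; infer_instance

-- ===== CLAIM (what is proved, stated in full; the proofs are below) =====
def Claim_equal_solution : Prop := ∀ (research : List String) (n : Int) (k : Int), Dom_solution research n k → Spec_solution research n k (solution research n k)

-- ===== LEMMAS AND PROOFS =====

-- per-char count list, the common spec of A's dict row and B's counts list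
def cnts (research : List String) (c : Char) : List Int :=
  research.map (fun w => (w.toList.count c : Int))

-- length of the maximal suffix of p all ≥ k (A's streak counter 'con', uncapped)
def runK (k : Int) (p : List Int) : Nat :=
  (p.reverse.takeWhile (fun x => decide (k ≤ x))).length

-- A's loop state after processing prefix p (for n ≥ 1)
def conS (n k : Int) (p : List Int) : Int := min (runK k p : Int) (n - 1)
def wsS (n k : Int) (p : List Int) : Int := (p.reverse.take (conS n k p).toNat).sum
def stS (n k : Int) (p : List Int) : Int × Int × Int := (winCount p n k, conS n k p, wsS n k p)

lemma runK_append (k x : Int) (p : List Int) :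
    runK k (p ++ [x]) = if k ≤ x then runK k p + 1 else 0 := by
  simp [runK, List.takeWhile_cons]
  split_ifs with h <;> simp

lemma runK_le_length (k : Int) (p : List Int) : runK k p ≤ p.length := by
  simpa [runK] using (List.takeWhile_sublist (l := p.reverse) _).length_le

lemma take_all_iff_le_takeWhile {l : List Int} {q : Int → Bool} {n : Nat} (hn : n ≤ l.length) :
    ((l.take n).all q = true ↔ n ≤ (l.takeWhile q).length) := by
  induction l generalizing n with
  | nil => simp_all
  | cons a t ih =>
    cases n with
    | zero => simp
    | succ m =>
      simp only [List.take_succ_cons, List.all_cons, List.takeWhile_cons]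
      by_cases hq : q a
      · simp [hq, ih (by simpa using hn)]
      · simp [hq]

-- window-count snoc step
lemma winCount_eq_countP (cs : List Int) (n k : Int) (hn : 1 ≤ n) :
    winCount cs n k =
      ((PySem.List.pyRange 0 ((cs.length : Int) - n + 1) 1).countP (fun i =>
        (PySem.List.slice cs (some i) (some (i + n))).all (fun x => decide (k ≤ x))
          && decide (2*n*k ≤ (PySem.List.slice cs (some i) (some (i + n))).sum)) : Int) := by
  simp only [winCount, if_pos hn]
  exact (PySem.List.foldl_count_if _ _ 0).trans (by ring)

-- slice of an extended list agrees on windows inside the prefix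

lemma slice_append_window (p : List Int) (x : Int) {i n : Int} (hi : 0 ≤ i) (hn : 0 ≤ n)
    (hub : i + n ≤ (p.length : Int)) :
    PySem.List.slice (p ++ [x]) (some i) (some (i + n)) = PySem.List.slice p (some i) (some (i + n)) := by
  rw [PySem.List.slice_toNat _ hi (by omega), PySem.List.slice_toNat _ hi (by omega)]
  rw [List.drop_append_of_le_length (by omega)]
  rw [List.take_append_of_le_length (by simp; omega)]

lemma winCount_append (x : Int) (p : List Int) {n : Int} (k : Int) (hn : 1 ≤ n) :
    winCount (p ++ [x]) n k
      = winCount p n k +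
        (if (n : Int) ≤ (runK k (p ++ [x]) : Int) ∧ 2*n*k ≤ ((p ++ [x]).reverse.take n.toNat).sum
         then 1 else 0) := by
  have hrun : (runK k (p ++ [x]) : Int) ≤ (p.length : Int) + 1 := by
    have h := runK_le_length k (p ++ [x])
    simp only [List.length_append, List.length_cons, List.length_nil] at h
    exact_mod_cast Nat.le_of_lt_succ (Nat.lt_succ_of_le (by omega))
  by_cases hnl : n ≤ (p.length : Int) + 1
  · rw [winCount_eq_countP _ _ _ hn, winCount_eq_countP _ _ _ hn]
    have hlen : ((p ++ [x]).length : Int) - n + 1 = ((p.length : Int) - n + 1) + 1 := by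
      simp; ring
    rw [hlen, PySem.List.pyRange_one_succ_right (by omega)]
    rw [List.countP_append]
    have hcongr : (PySem.List.pyRange 0 ((p.length : Int) - n + 1) 1).countP (fun i =>
        (PySem.List.slice (p ++ [x]) (some i) (some (i + n))).all (fun x => decide (k ≤ x))
          && decide (2*n*k ≤ (PySem.List.slice (p ++ [x]) (some i) (some (i + n))).sum))
        = (PySem.List.pyRange 0 ((p.length : Int) - n + 1) 1).countP (fun i =>
        (PySem.List.slice p (some i) (some (i + n))).all (fun x => decide (k ≤ x))
          && decide (2*n*k ≤ (PySem.List.slice p (some i) (some (i + n))).sum)) := by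
      apply List.countP_congr
      intro i hi
      have := (PySem.List.mem_pyRange_one).1 hi
      rw [slice_append_window p x this.1 (by omega) (by omega)]
    rw [hcongr]
    -- the new window
    have hwin : PySem.List.slice (p ++ [x]) (some ((p.length : Int) - n + 1)) (some ((p.length : Int) - n + 1 + n))
        = (p ++ [x]).drop ((p ++ [x]).length - n.toNat) := by
      rw [PySem.List.slice_toNat _ (by omega) (by omega)]
      rw [List.take_of_length_le (by simp; omega)]
      congr 1
      simp; omega
    have hrev : ((p ++ [x]).drop ((p ++ [x]).length - n.toNat)) = ((p ++ [x]).reverse.take n.toNat).reverse := by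
      rw [List.take_reverse]; simp
    simp only [List.countP_cons, List.countP_nil, hwin, hrev]
    have hall : (((p ++ [x]).reverse.take n.toNat).reverse.all (fun x => decide (k ≤ x)) = true)
        ↔ (n : Int) ≤ (runK k (p ++ [x]) : Int) := by
      rw [List.all_reverse]
      rw [take_all_iff_le_takeWhile (by simp; omega)]
      unfold runK
      omega
    have hsum : ((p ++ [x]).reverse.take n.toNat).reverse.sum = ((p ++ [x]).reverse.take n.toNat).sum :=
      List.sum_reverse _
    have hcond : ((((p ++ [x]).reverse.take n.toNat).reverse.all (fun x => decide (k ≤ x))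
          && decide (2*n*k ≤ ((p ++ [x]).reverse.take n.toNat).reverse.sum)) = true)
        ↔ ((n : Int) ≤ (runK k (p ++ [x]) : Int) ∧ 2*n*k ≤ ((p ++ [x]).reverse.take n.toNat).sum) := by
      rw [Bool.and_eq_true, hall, hsum, decide_eq_true_iff]
    simp only [hcond]
    push_cast
    split_ifs <;> omega
  · have h1 : winCount (p ++ [x]) n k = 0 := by
      simp only [winCount, if_pos hn]
      rw [show ((p ++ [x]).length : Int) - n + 1 = (p.length : Int) + 1 - n + 1 by simp]
      rw [PySem.List.pyRange_one_eq_nil (by omega)]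
      simp
    have h2 : winCount p n k = 0 := by
      simp only [winCount, if_pos hn]
      rw [PySem.List.pyRange_one_eq_nil (by omega)]
      simp
    rw [h1, h2, if_neg (fun h => by have := h.1; omega)]
    norm_num

-- one step of A's loop realises the state spec
lemma stepA_spec {n k : Int} (hn : 1 ≤ n) (pre rest : List Int) (x : Int) :
    (if k ≤ x then
      let ws := (wsS n k pre) + x
      let con := (conS n k pre) + 1
      if con = n then
        ((if 2*n*k ≤ ws then (winCount pre n k) + 1 else (winCount pre n k)), n - 1,
          ws - PySem.List.pyGetD (pre ++ [x] ++ rest) ((pre.length : Int) - n + 1) 0)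
      else (winCount pre n k, con, ws)
    else (winCount pre n k, 0, 0)) = stS n k (pre ++ [x]) := by
  have hr := runK_le_length k pre
  have hwc := winCount_append x pre k hn
  have hrun' := runK_append k x pre
  by_cases hx : k ≤ x
  · rw [if_pos hx]
    simp only [hx, if_pos] at hrun'
    by_cases h1 : conS n k pre + 1 = n
    · -- the streak reaches n: window checked, window head dropped
      have hrle : n - 1 ≤ (runK k pre : Int) := by
        by_contra hlt
        simp only [conS] at h1
        omega
      have hmin : conS n k pre = n - 1 := by simp only [conS]; omega
      have hnlen : n.toNat ≤ pre.length + 1 := by omega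
      -- the last-n-window sum of pre ++ [x]
      have hS : ((pre ++ [x]).reverse.take n.toNat).sum = wsS n k pre + x := by
        rw [List.reverse_append, List.reverse_singleton, List.singleton_append]
        rw [show n.toNat = (n.toNat - 1) + 1 by omega, List.take_succ_cons, List.sum_cons]
        rw [wsS, hmin, show (n - 1).toNat = n.toNat - 1 by omega]
        ring
      -- the dropped head of the window
      have hidx : PySem.List.pyGetD (pre ++ [x] ++ rest) ((pre.length : Int) - n + 1) 0
          = (pre ++ [x]).reverse[n.toNat - 1]'(by simp; omega) := by
        rw [PySem.List.pyGetD_eq_getElem _ _ (by omega) (by simp; omega)]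
        rw [List.getElem_append_left (by simp; omega)]
        rw [List.getElem_reverse]
        congr 1
        simp
        omega
      have hws' : wsS n k (pre ++ [x]) = wsS n k pre + x
          - PySem.List.pyGetD (pre ++ [x] ++ rest) ((pre.length : Int) - n + 1) 0 := by
        have hcon' : conS n k (pre ++ [x]) = n - 1 := by
          simp only [conS, hrun']; omega
        rw [wsS, hcon', show (n-1).toNat = n.toNat - 1 by omega]
        have : (pre ++ [x]).reverse.take n.toNat
            = (pre ++ [x]).reverse.take (n.toNat - 1) ++ [(pre ++ [x]).reverse[n.toNat - 1]'(by simp; omega)] := by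
          rw [List.take_concat_get' _ (n.toNat - 1) (by simp; omega)]
          congr 1
          omega
        have hsumsplit := congrArg List.sum this
        rw [List.sum_append, List.sum_singleton] at hsumsplit
        rw [hidx]
        omega
      rw [if_pos h1]
      simp only [stS]
      refine Prod.ext ?_ (Prod.ext ?_ ?_)
      · -- counts
        simp only [hwc, hS]
        have hcnd : n ≤ (runK k (pre ++ [x]) : Int) := by omega
        split_ifs with h2 h3 h3
        · ring
        · exact absurd ⟨hcnd, h2⟩ h3
        · exact absurd h3.2 h2
        · ring
      · simp only [conS, hrun']; omega
      · simp only []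
        rw [hws']
    · -- streak still below n
      have hlt : (runK k pre : Int) < n - 1 := by
        by_contra hge
        simp only [conS] at h1
        omega
      have hmin : conS n k pre = (runK k pre : Int) := by simp only [conS]; omega
      rw [if_neg h1]
      simp only [stS]
      refine Prod.ext ?_ (Prod.ext ?_ ?_)
      · simp only [hwc]
        rw [if_neg (fun h => by have := h.1; omega)]
        ring
      · simp only [conS, hrun']; omega
      · simp only [wsS, conS, hrun']
        rw [List.reverse_append, List.reverse_singleton, List.singleton_append]
        push_cast
        rw [show (min ((runK k pre : Int) + 1) (n-1)).toNat = runK k pre + 1 by omega]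
        rw [List.take_succ_cons, List.sum_cons]
        rw [show (min ((runK k pre : Int)) (n-1)).toNat = runK k pre by omega]
        ring
  · rw [if_neg hx]
    simp only [hx, ↓reduceIte] at hrun'
    simp only [stS]
    refine Prod.ext ?_ (Prod.ext ?_ ?_)
    · simp only [hwc, hrun']
      rw [if_neg (fun h => by have := h.1; omega)]
      ring
    · simp only [conS, hrun']; omega
    · simp only [wsS, conS, hrun']
      rw [show (min ((0:Nat) : Int) (n-1)).toNat = 0 by omega]
      simp

lemma innerA_inv {n k : Int} (hn : 1 ≤ n) (cs : List Int) :
    ∀ suf pre, pre ++ suf = cs →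
      (PySem.List.enumerate suf (pre.length : Int)).foldl
        (fun t (p : Int × Int) =>
          if k ≤ p.2 then
            let ws := t.2.2 + p.2
            let con := t.2.1 + 1
            if con = n then
              ((if 2*n*k ≤ ws then t.1 + 1 else t.1), n - 1, ws - PySem.List.pyGetD cs (p.1 - n + 1) 0)
            else (t.1, con, ws)
          else (t.1, 0, 0)) (stS n k pre) = stS n k cs := by
  intro suf
  induction suf with
  | nil =>
    intro pre h
    rw [List.append_nil] at h
    subst h
    rw [PySem.List.enumerate_nil, List.foldl_nil]
  | cons x rest ih =>
    intro pre h
    subst h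
    rw [PySem.List.enumerate_cons, List.foldl_cons]
    have h2 := ih (pre ++ [x]) (by simp)
    rw [show ((pre ++ [x]).length : Int) = (pre.length : Int) + 1 by simp] at h2
    refine Eq.trans ?_ h2
    congr 1
    have hone := stepA_spec (n := n) (k := k) hn pre rest x
    rw [← List.append_cons] at hone
    exact hone

-- A's counter never reaches n when n < 1, so nothing is ever counted
lemma innerA_nonpos {n k : Int} (hn : ¬ 1 ≤ n) (cs : List Int) (l : List (Int × Int)) :
    ∀ (t : Int × Int × Int), t.1 = 0 → 0 ≤ t.2.1 →
      (l.foldl (fun t (p : Int × Int) =>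
        if k ≤ p.2 then
          let ws := t.2.2 + p.2
          let con := t.2.1 + 1
          if con = n then
            ((if 2*n*k ≤ ws then t.1 + 1 else t.1), n - 1, ws - PySem.List.pyGetD cs (p.1 - n + 1) 0)
          else (t.1, con, ws)
        else (t.1, 0, 0)) t).1 = 0 := by
  induction l with
  | nil => intro t h1 _; simpa using h1
  | cons p rest ih =>
    intro t h1 h2
    rw [List.foldl_cons]
    by_cases hx : k ≤ p.2
    · have hstep : (if k ≤ p.2 then
          let ws := t.2.2 + p.2
          let con := t.2.1 + 1
          if con = n then
            ((if 2*n*k ≤ ws then t.1 + 1 else t.1), n - 1, ws - PySem.List.pyGetD cs (p.1 - n + 1) 0)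
          else (t.1, con, ws)
        else (t.1, 0, 0)) = (t.1, t.2.1 + 1, t.2.2 + p.2) := by
        rw [if_pos hx]
        dsimp only
        rw [if_neg (by omega)]
      rw [hstep]
      exact ih _ h1 (show (0 : Int) ≤ t.2.1 + 1 by omega)
    · rw [if_neg hx]
      exact ih _ h1 le_rfl

lemma innerA_eq_winCount (cs : List Int) (n k : Int) : (innerA cs n k).1 = winCount cs n k := by
  by_cases hn : 1 ≤ n
  · have h0 : stS n k [] = (0, 0, 0) := by
      have hw : winCount [] n k = 0 := by
        rw [winCount, if_pos hn]
        rw [PySem.List.pyRange_one_eq_nil (by simp; exact hn)]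
        rfl
      have hc : conS n k [] = 0 := by
        simp only [conS, runK, List.reverse_nil, List.takeWhile_nil, List.length_nil]
        omega
      have hws : wsS n k [] = 0 := by simp [wsS]
      simp [stS, hw, hc, hws]
    have := innerA_inv (n := n) (k := k) hn cs cs [] rfl
    rw [h0] at this
    unfold innerA
    rw [show ((List.nil (α := Int)).length : Int) = 0 by simp] at this
    rw [this]
    rfl
  · rw [winCount, if_neg hn]
    exact innerA_nonpos hn cs (PySem.List.enumerate cs) (0, 0, 0) rfl le_rfl

-- ===== the dict built by A holds exactly the per-char count lists =====

-- a fold of constant-value inserts: looked-up value for an inserted key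
lemma foldl_insert_const_getD (v : List Int) :
    ∀ (l : List Char) (c : Char) (d : PySem.Dict Char (List Int)),
      (l.foldl (fun d c => d.insert c v) d).getD c [] = (if c ∈ l then v else d.getD c []) := by
  intro l
  induction l with
  | nil => intro c d; simp
  | cons a t ih =>
    intro c d
    rw [List.foldl_cons, ih]
    by_cases hct : c ∈ t
    · simp [hct]
    · by_cases hca : c = a
      · subst hca
        simp [hct, PySem.Dict.getD_insert_self]
      · simp [hct, hca, PySem.Dict.getD_insert_of_ne _ _ _ hca]

-- a fold of modifies at keys other than c leaves the looked-up value at c alone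
lemma foldl_modify_getD_not_mem (m : Int) (c : Char) :
    ∀ (q : List (Char × Int)) (d : PySem.Dict Char (List Int)), c ∉ q.map Prod.fst →
      (q.foldl (fun d p => d.modify p.1 [] (fun l => PySem.List.pySetD l m p.2)) d).getD c []
        = d.getD c [] := by
  intro q
  induction q with
  | nil => intro d _; rfl
  | cons p t ih =>
    intro d hc
    simp only [List.map_cons, List.mem_cons] at hc
    have hc1 : c ≠ p.1 := fun h => hc (Or.inl h)
    have hc2 : c ∉ t.map Prod.fst := fun h => hc (Or.inr h)
    rw [List.foldl_cons, ih _ hc2, PySem.Dict.getD_modify_of_ne _ _ _ hc1]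

-- a fold of modifies whose keys are distinct applies exactly the one modify at c
lemma foldl_modify_getD_mem (m : Int) (c : Char) (v : Int) :
    ∀ (q : List (Char × Int)) (d : PySem.Dict Char (List Int)),
      (c, v) ∈ q → (q.map Prod.fst).Nodup →
      (q.foldl (fun d p => d.modify p.1 [] (fun l => PySem.List.pySetD l m p.2)) d).getD c []
        = PySem.List.pySetD (d.getD c []) m v := by
  intro q
  induction q with
  | nil => intro d h _; cases h
  | cons p t ih =>
    intro d hmem hnd
    simp only [List.map_cons, List.nodup_cons] at hnd
    rw [List.foldl_cons]
    rcases List.mem_cons.1 hmem with heq | hmemt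
    · have hpc : p.1 = c ∧ p.2 = v := by
        rw [← heq]
        exact ⟨rfl, rfl⟩
      have hnotin : c ∉ t.map Prod.fst := by
        rw [← hpc.1]; exact hnd.1
      rw [foldl_modify_getD_not_mem m c t _ hnotin]
      rw [hpc.1, PySem.Dict.getD_modify_self, hpc.2]
    · have hne : c ≠ p.1 := by
        intro hc
        exact hnd.1 (hc ▸ (List.mem_map_of_mem hmemt : (c, v).1 ∈ t.map Prod.fst))
      rw [ih _ hmemt hnd.2, PySem.Dict.getD_modify_of_ne _ _ _ hne]

-- membership in Counter(w).most_common()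
lemma mem_most_common (w : List Char) (c : Char) (v : Int) :
    ((c, v) ∈ PySem.List.sorted (PySem.Dict.counter w).items (fun q => q.2) true)
      ↔ (c ∈ w ∧ v = (w.count c : Int)) := by
  rw [(PySem.List.sorted_perm _ _ _).mem_iff, PySem.Dict.items_counter]
  simp only [List.mem_map, Prod.mk.injEq]
  constructor
  · rintro ⟨a, ha, rfl, rfl⟩
    exact ⟨(PySem.Set.mem_ofList w a).1 ha, rfl⟩
  · rintro ⟨hc, rfl⟩
    exact ⟨c, (PySem.Set.mem_ofList w c).2 hc, rfl, rfl⟩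

lemma keys_most_common_nodup (w : List Char) :
    ((PySem.List.sorted (PySem.Dict.counter w).items (fun q => q.2) true).map Prod.fst).Nodup := by
  have hperm := (PySem.List.sorted_perm (PySem.Dict.counter w).items (fun q => q.2) true).map Prod.fst
  rw [hperm.nodup_iff, PySem.Dict.items_counter, List.map_map]
  have hcomp : (Prod.fst ∘ fun k : Char => (k, (w.count k : Int))) = id := rfl
  rw [hcomp, List.map_id]
  exact PySem.Set.nodup_ofList w

lemma dict_fold_inv (research : List String) (c : Char) :
    ∀ (suf pre : List String) (d : PySem.Dict Char (List Int)), pre ++ suf = research →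
      d.getD c [] = cnts pre c ++ List.replicate (research.length - pre.length) 0 →
      ((PySem.List.enumerate suf (pre.length : Int)).foldl (fun d p =>
        (PySem.List.sorted (PySem.Dict.counter p.2.toList).items (fun q => q.2) true).foldl
          (fun d q => d.modify q.1 [] (fun l => PySem.List.pySetD l p.1 q.2)) d) d).getD c []
      = cnts research c := by
  intro suf
  induction suf with
  | nil =>
    intro pre d h hd
    rw [List.append_nil] at h
    subst h
    rw [PySem.List.enumerate_nil, List.foldl_nil, hd]
    simp [cnts]
  | cons w rest ih =>
    intro pre d h hd
    have hlen : pre.length < research.length := by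
      rw [← h]; simp
    rw [PySem.List.enumerate_cons, List.foldl_cons]
    have hrepl : List.replicate (research.length - pre.length) (0 : Int)
        = 0 :: List.replicate (research.length - (pre.length + 1)) 0 := by
      rw [show research.length - pre.length = (research.length - (pre.length + 1)) + 1 by omega]
      rw [List.replicate_succ]
    have hcnts : (cnts pre c).length = pre.length := by simp [cnts]
    have hnext : ∀ u : Int,
        PySem.List.pySetD (d.getD c []) (pre.length : Int) u
          = (cnts pre c ++ [u]) ++ List.replicate (research.length - (pre.length + 1)) 0 := by
      intro u
      rw [hd, hrepl, PySem.List.pySetD_natCast]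
      rw [List.set_append, if_neg (by omega), hcnts, Nat.sub_self]
      simp
    have harr : ∀ d' : PySem.Dict Char (List Int),
        d'.getD c [] = cnts (pre ++ [w]) c ++ List.replicate (research.length - (pre ++ [w]).length) 0 →
        ((PySem.List.enumerate rest ((pre.length : Int) + 1)).foldl (fun d p =>
          (PySem.List.sorted (PySem.Dict.counter p.2.toList).items (fun q => q.2) true).foldl
            (fun d q => d.modify q.1 [] (fun l => PySem.List.pySetD l p.1 q.2)) d) d').getD c []
          = cnts research c := by
      intro d' hd'
      have := ih (pre ++ [w]) d' (by simpa using h) hd'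
      rw [show ((pre ++ [w]).length : Int) = (pre.length : Int) + 1 by simp] at this
      exact this
    by_cases hcw : c ∈ w.toList
    · apply harr
      rw [foldl_modify_getD_mem (pre.length : Int) c (w.toList.count c : Int) _ d
        ((mem_most_common w.toList c _).2 ⟨hcw, rfl⟩) (keys_most_common_nodup w.toList)]
      rw [hnext]
      simp [cnts]
    · apply harr
      rw [foldl_modify_getD_not_mem]
      · rw [hd, hrepl]
        have : cnts (pre ++ [w]) c = cnts pre c ++ [(0 : Int)] := by
          simp [cnts, List.count_eq_zero_of_not_mem hcw]
        rw [this]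
        simp
      · intro hmem
        rcases List.mem_map.1 hmem with ⟨q, hq, hq1⟩
        have := (mem_most_common w.toList q.1 q.2).1 (by rwa [show ((q.1 : Char), (q.2 : Int)) = q from rfl])
        exact hcw (hq1 ▸ this.1)

lemma dict_row (research : List String) (c : Char)
    (hc : c ∈ PySem.List.sorted (PySem.Set.ofList (PySem.Str.join "" research).toList) (fun x => x) false) :
    ((PySem.List.enumerate research).foldl (fun d p =>
      (PySem.List.sorted (PySem.Dict.counter p.2.toList).items (fun q => q.2) true).foldl
        (fun d q => d.modify q.1 [] (fun l => PySem.List.pySetD l p.1 q.2)) d)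
      ((PySem.List.sorted (PySem.Set.ofList (PySem.Str.join "" research).toList) (fun x => x) false).foldl
        (fun d c => d.insert c (List.replicate research.length 0)) PySem.Dict.empty)).getD c []
    = cnts research c := by
  have hinit := foldl_insert_const_getD (List.replicate research.length 0)
    (PySem.List.sorted (PySem.Set.ofList (PySem.Str.join "" research).toList) (fun x => x) false)
    c PySem.Dict.empty
  rw [if_pos hc] at hinit
  have hd0 : ((PySem.List.sorted (PySem.Set.ofList (PySem.Str.join "" research).toList) (fun x => x) false).foldl
        (fun d c => d.insert c (List.replicate research.length 0)) PySem.Dict.empty).getD c []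
      = cnts ([] : List String) c ++ List.replicate (research.length - ([] : List String).length) 0 := by
    rw [hinit]
    simp [cnts]
  have := dict_fold_inv research c research [] _ rfl hd0
  rw [show ((List.nil (α := String)).length : Int) = 0 by simp] at this
  exact this

-- ===== the outer maximum-selection folds agree =====
lemma outer_fold (l : List Char) (f g : Char → Int) (hfg : ∀ c ∈ l, f c = g c) :
    ∀ (h : Int) (r : String), 0 ≤ h →
      (l.foldl (fun st c => if st.2 < g c then (String.ofList [c], g c) else st)
        ((if h = 0 then "None" else r), h)).1
      = (if (l.foldl (fun st c => if st.1 < f c then (f c, String.ofList [c]) else st) (h, r)).1 = 0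
         then "None"
         else (l.foldl (fun st c => if st.1 < f c then (f c, String.ofList [c]) else st) (h, r)).2) := by
  induction l with
  | nil => intro h r _; simp
  | cons c t ih =>
    intro h r h0
    have hc : f c = g c := hfg c List.mem_cons_self
    simp only [List.foldl_cons]
    by_cases hlt : h < f c
    · rw [if_pos hlt, if_pos (by omega : h < g c) , ← hc]
      have : ((if (f c) = 0 then "None" else String.ofList [c]), f c)
          = ((String.ofList [c] : String), f c) := by
        rw [if_neg (by omega)]
      rw [← this]
      exact ih (fun c hx => hfg c (List.mem_cons_of_mem _ hx)) (f c) (String.ofList [c]) (by omega)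
    · rw [if_neg hlt, if_neg (by omega : ¬ h < g c)]
      exact ih (fun c hx => hfg c (List.mem_cons_of_mem _ hx)) h r h0

-- ===== VERDICT (by name: the statement is the Claim_ definition above) =====
theorem solution_spec : Claim_equal_solution := by
  intro research n k _
  show solution research n k = solution_alt research n k
  have hfg : ∀ c ∈ (PySem.List.sorted (PySem.Set.ofList (PySem.Str.join "" research).toList) (fun x => x) false),
      (innerA (((PySem.List.enumerate research).foldl (fun d p =>
        (PySem.List.sorted (PySem.Dict.counter p.2.toList).items (fun q => q.2) true).foldl
          (fun d q => d.modify q.1 [] (fun l => PySem.List.pySetD l p.1 q.2)) d)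
        ((PySem.List.sorted (PySem.Set.ofList (PySem.Str.join "" research).toList) (fun x => x) false).foldl
          (fun d c => d.insert c (List.replicate research.length 0)) PySem.Dict.empty)).getD c []) n k).1
        = winCount (research.map (fun w => w.toList.foldl (fun acc ch => if ch == c then acc + 1 else acc) 0)) n k := by
    intro c hc
    rw [dict_row research c hc, innerA_eq_winCount]
    congr 1
    unfold cnts
    refine List.map_congr_left ?_
    intro w _
    rw [PySem.List.foldl_count_if (fun ch => ch == c) w.toList 0]
    rw [List.count_eq_countP]
    omega
  have h := outer_fold _ _ _ hfg 0 "" le_rfl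
  rw [if_pos rfl] at h
  exact h.symm
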